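-- pv_equiv track=rewrite | github.com/camiloabecerra/Number-Notation-Converter | roman_numerals.py | confirm_order
-- ===== SOURCE A (Python) =====
-- def confirm_order(roman_list):
--     if len(roman_list) == 1:
--         return True
--     else:
--         digit = roman_list[0]
--         next_digit = roman_list[1]
--         cond_i = digit == 1 and next_digit <= 10
--         cond_x = digit == 10 and next_digit <= 100
--         cond_c = digit == 100 and next_digit <= 1000
--         cond_1 = cond_i or cond_x or cond_c
--         cond_2 = len(list(filter(lambda num : next_digit < num, roman_list[2:]))) == 0
--         if digit >= next_digit or (cond_1 and cond_2):
--             return confirm_order(roman_list[1:])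
--         else:
--             return False
-- ===== SOURCE B (Python) =====
-- def confirm_order(roman_list):
--     ok = True
--     mx = roman_list[-1]  # maximum of the suffix already processed
--     for d, nd in reversed(list(zip(roman_list, roman_list[1:]))):
--         cond1 = (d == 1 and nd <= 10) or (d == 10 and nd <= 100) or (d == 100 and nd <= 1000)
--         ok = (d >= nd or (cond1 and nd >= mx)) and ok
--         mx = d if d > mx else mx
--     return ok
-- ===== Notes on version B (the rewrite author's own statement) =====
-- stated objective: faster
-- what changed: Replaces A's recursion with a per-step filter over the whole remaining suffix by a single iterative backward pass over the adjacent pairs that carries the suffix maximum, so the inner scan (and the recursion) disappears.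
import Mathlib
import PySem

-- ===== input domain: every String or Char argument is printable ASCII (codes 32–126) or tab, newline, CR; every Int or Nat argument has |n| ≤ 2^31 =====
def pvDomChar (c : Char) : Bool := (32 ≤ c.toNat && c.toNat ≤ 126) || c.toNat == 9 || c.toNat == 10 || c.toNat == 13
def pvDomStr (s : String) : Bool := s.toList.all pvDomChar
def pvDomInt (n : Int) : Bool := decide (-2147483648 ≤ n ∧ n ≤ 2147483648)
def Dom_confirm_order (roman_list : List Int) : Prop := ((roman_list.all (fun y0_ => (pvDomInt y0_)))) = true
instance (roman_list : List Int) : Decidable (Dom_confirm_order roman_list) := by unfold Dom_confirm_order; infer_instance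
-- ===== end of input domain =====

-- B replaces A's recursion with per-step filter over the remaining suffix by one backward
-- pass over the adjacent pairs carrying the suffix maximum; equivalence on non-empty lists.

-- ===== PORT A =====
def confirm_order (roman_list : List Int) : Bool :=
  match roman_list with
  | [] => false        -- Python raises IndexError here (roman_list[0]); excluded by Pre_
  | [_] => true        -- len(roman_list) == 1
  | digit :: next_digit :: rest =>
      let cond_i := digit == 1 && next_digit ≤ 10
      let cond_x := digit == 10 && next_digit ≤ 100
      let cond_c := digit == 100 && next_digit ≤ 1000
      let cond_1 := cond_i || cond_x || cond_c
      let cond_2 := (rest.filter (fun num => next_digit < num)).length == 0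
      if digit ≥ next_digit || (cond_1 && cond_2) then
        confirm_order (next_digit :: rest)
      else
        false

-- ===== PORT B =====
-- the loop body of Source B: state (ok, mx), pair (d, nd)
def pyStep (st : Bool × Int) (p : Int × Int) : Bool × Int :=
  let d := p.1
  let nd := p.2
  let cond1 := (d == 1 && nd ≤ 10) || (d == 10 && nd ≤ 100) || (d == 100 && nd ≤ 1000)
  ((d ≥ nd || (cond1 && nd ≥ st.2)) && st.1, if d > st.2 then d else st.2)

def confirm_order_alt (roman_list : List Int) : Bool :=
  -- mx = roman_list[-1] (IndexError on [] is excluded by Pre_; 0 is the PySem default, unreachable)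
  let mx := PySem.List.pyGetD roman_list (-1) 0
  -- reversed(list(zip(roman_list, roman_list[1:])))
  let pairs := (roman_list.zip (PySem.List.slice roman_list (some 1) none)).reverse
  (pairs.foldl pyStep (true, mx)).1

-- ===== PRECONDITION & SPEC =====
-- both Pythons raise IndexError on the empty list (roman_list[0] / roman_list[-1])
def Pre_confirm_order (roman_list : List Int) : Prop := roman_list ≠ []
instance (roman_list : List Int) : Decidable (Pre_confirm_order roman_list) := by unfold Pre_confirm_order; infer_instance
def pvWitness_confirm_order : List Int := ([1, 5, 10])

def Spec_confirm_order (roman_list : List Int) (out : Bool) : Prop := out = confirm_order_alt roman_list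
instance (roman_list : List Int) (out : Bool) : Decidable (Spec_confirm_order roman_list out) := by unfold Spec_confirm_order; infer_instance

-- ===== CLAIM (what is proved, stated in full; the proofs are below) =====
def Claim_equal_confirm_order : Prop := ∀ (roman_list : List Int), Dom_confirm_order roman_list → Pre_confirm_order roman_list → Spec_confirm_order roman_list (confirm_order roman_list)

-- ===== LEMMAS AND PROOFS =====

-- proof-side helper: pyScan l = (order-ok of l, max of l), one structural pass
def pyScan (lst : List Int) : Bool × Int :=
  match lst with
  | [] => (true, 0)
  | [x] => (true, x)
  | d :: nd :: rest =>
      let (ok_t, mx_t) := pyScan (nd :: rest)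
      let cond1 := (d == 1 && nd ≤ 10) || (d == 10 && nd ≤ 100) || (d == 100 && nd ≤ 1000)
      let ok := (d ≥ nd || (cond1 && nd ≥ mx_t)) && ok_t
      (ok, if mx_t > d then mx_t else d)

-- the second component of pyScan is an upper bound of the list …
theorem pyScan_snd_ub (lst : List Int) : ∀ x ∈ lst, x ≤ (pyScan lst).2 := by
  match lst with
  | [] => simp
  | [x] => simp [pyScan]
  | d :: nd :: rest =>
      have ih := pyScan_snd_ub (nd :: rest)
      intro x hx
      simp only [pyScan]
      split_ifs with h
      · rcases List.mem_cons.mp hx with rfl | hx'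
        · omega
        · exact ih x hx'
      · rcases List.mem_cons.mp hx with rfl | hx'
        · omega
        · have := ih x hx'; omega

-- … and is attained: it is the head or an element of the tail
theorem pyScan_snd_mem (lst : List Int) (h : lst ≠ []) : (pyScan lst).2 ∈ lst := by
  match lst with
  | [] => exact absurd rfl h
  | [x] => simp [pyScan]
  | d :: nd :: rest =>
      have ih := pyScan_snd_mem (nd :: rest) (by simp)
      simp only [pyScan]
      split_ifs with hgt
      · exact List.mem_cons_of_mem _ ih
      · exact List.mem_cons_self

-- A's emptiness-of-filter test equals the comparison with the suffix maximum
theorem cond2_eq (nd : Int) (rest : List Int) :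
    ((rest.filter (fun num => nd < num)).length == 0)
      = decide (nd ≥ (pyScan (nd :: rest)).2) := by
  have ub := pyScan_snd_ub (nd :: rest)
  have mem := pyScan_snd_mem (nd :: rest) (by simp)
  by_cases h : ∀ x ∈ rest, x ≤ nd
  · have hf : rest.filter (fun num => nd < num) = [] := by
      rw [List.filter_eq_nil_iff]
      intro x hx
      simpa using not_lt.mpr (h x hx)
    have hmx : nd ≥ (pyScan (nd :: rest)).2 := by
      rcases List.mem_cons.mp mem with he | hm
      · omega
      · exact h _ hm
    simp [hf, hmx]
  · push Not at h
    obtain ⟨x, hx, hlt⟩ := h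
    have hne : rest.filter (fun num => nd < num) ≠ [] := by
      intro hnil
      have := List.filter_eq_nil_iff.mp hnil x hx
      simp at this; omega
    have hmx : ¬ nd ≥ (pyScan (nd :: rest)).2 := by
      have := ub x (List.mem_cons_of_mem _ hx); omega
    simp [hmx, List.length_eq_zero_iff, hne]

-- A's recursion computes the first component of pyScan
theorem confirm_order_eq_pyScan (lst : List Int) (h : lst ≠ []) :
    confirm_order lst = (pyScan lst).1 := by
  match lst with
  | [] => exact absurd rfl h
  | [x] => simp [confirm_order, pyScan]
  | d :: nd :: rest =>
      have ih := confirm_order_eq_pyScan (nd :: rest) (by simp)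
      simp only [confirm_order, pyScan, cond2_eq, ih]
      by_cases hc : (decide (d ≥ nd) || ((d == 1 && decide (nd ≤ 10)
            || d == 10 && decide (nd ≤ 100) || d == 100 && decide (nd ≤ 1000))
            && decide (nd ≥ (pyScan (nd :: rest)).2))) = true
      · simp [hc]
      · simp [hc]

-- B's backward fold over adjacent pairs computes pyScan (both components)
theorem fold_eq_pyScan (l : List Int) (d : Int) :
    ((d :: l).zip l).reverse.foldl pyStep (true, (d :: l).getLast (by simp))
      = pyScan (d :: l) := by
  match l with
  | [] => simp [pyScan]
  | nd :: rest =>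
      have ih := fold_eq_pyScan rest nd
      have hlast : (d :: nd :: rest).getLast (by simp)
          = (nd :: rest).getLast (by simp) := by
        exact List.getLast_cons (by simp)
      simp only [List.zip_cons_cons, List.reverse_cons, List.foldl_append, hlast, ih]
      simp only [List.foldl_cons, List.foldl_nil, pyScan, pyStep]
      rw [Prod.mk.injEq]
      refine ⟨rfl, ?_⟩
      split_ifs <;> omega

-- ===== VERDICT (by name: the statement is the Claim_ definition above) =====
theorem confirm_order_spec : Claim_equal_confirm_order := by
  intro roman_list _ hpre
  unfold Spec_confirm_order confirm_order_alt
  match roman_list with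
  | [] => exact absurd rfl hpre
  | d :: l =>
      rw [confirm_order_eq_pyScan (d :: l) (by simp)]
      rw [PySem.List.pyGetD_neg_one (d :: l) 0 (by simp)]
      rw [PySem.List.slice_from_one]
      simp only [List.tail_cons]
      rw [fold_eq_pyScan l d]
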